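-- pv_equiv track=rewrite | github.com/adewale/planet_cf | src/auth.py | parse_cookie_value
-- ===== SOURCE A (Python) =====
-- def parse_cookie_value(cookies_header: str, cookie_name: str) -> str | None:
--     """Extract a cookie value from a Cookie header string.
--
--     Args:
--         cookies_header: The raw Cookie header value (e.g., "session=abc; foo=bar")
--         cookie_name: The name of the cookie to extract
--
--     Returns:
--         The cookie value, or None if not found.
--     """
--     if not cookies_header:
--         return None
--
--     prefix = f"{cookie_name}="
--     for cookie in cookies_header.split(";"):
--         cookie = cookie.strip()
--         if cookie.startswith(prefix):
--             return cookie[len(prefix) :]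
--     return None
-- ===== SOURCE B (Python) =====
-- def parse_cookie_value(cookies_header: str, cookie_name: str) -> str | None:
--     jar = {}
--     for piece in cookies_header.split(";"):
--         c = piece.strip()
--         idx = c.find("=")
--         if idx != -1 and c[:idx] not in jar:
--             jar[c[:idx]] = c[idx + 1:]
--     return jar.get(cookie_name)
-- ===== Notes on version B (the rewrite author's own statement) =====
-- stated objective: alternative
-- what changed: B parses the whole header once into a first-occurrence-wins dict keyed by the text before the first '=' of each stripped piece and then answers by a single dict lookup, instead of A's prefix-scan with early return per piece.
-- outside the precondition, e.g. on parse_cookie_value('a=b=c', 'a=b'): A returns 'c', B returns None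
import Mathlib
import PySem

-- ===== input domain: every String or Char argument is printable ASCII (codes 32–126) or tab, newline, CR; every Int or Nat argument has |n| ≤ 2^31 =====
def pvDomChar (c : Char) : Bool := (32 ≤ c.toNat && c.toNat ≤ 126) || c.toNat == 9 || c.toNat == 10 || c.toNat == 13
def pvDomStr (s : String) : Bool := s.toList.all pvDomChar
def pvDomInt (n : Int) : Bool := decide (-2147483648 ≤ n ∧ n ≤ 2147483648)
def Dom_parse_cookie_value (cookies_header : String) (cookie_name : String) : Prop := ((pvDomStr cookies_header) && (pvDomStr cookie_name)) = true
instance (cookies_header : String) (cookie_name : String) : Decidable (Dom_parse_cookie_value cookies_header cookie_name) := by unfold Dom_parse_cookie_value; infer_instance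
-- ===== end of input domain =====

-- B replaces A's per-piece prefix scan with a single parse of the header into a
-- first-occurrence-wins dict (key = text before the first '=') followed by one lookup.

-- ===== PORT A =====
-- the 'for cookie in …: return …' loop of A, over the already-split pieces
def pvA_loop (pref : List Char) : List (List Char) → Option (List Char)
  | [] => none
  | cookie :: rest =>
    let c := PySem.Chars.strip cookie
    if PySem.Chars.startswith c pref then
      some (PySem.List.slice c (some (pref.length : Int)) none)
    else pvA_loop pref rest

def parse_cookie_value (cookies_header : String) (cookie_name : String) : Option String :=
  if cookies_header.toList = [] then none
  else
    (pvA_loop (cookie_name.toList ++ ['='])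
        (PySem.Chars.splitOn cookies_header.toList [';'])).map String.ofList

-- ===== PORT B =====
-- one iteration of Source B's loop body: strip, find first '=', first-occurrence insert
def pvB_step (d : PySem.Dict (List Char) (List Char)) (piece : List Char) :
    PySem.Dict (List Char) (List Char) :=
  let c := PySem.Chars.strip piece
  let idx := PySem.Chars.find c ['=']
  if idx ≠ -1 ∧ d.contains (PySem.List.slice c none (some idx)) = false then
    d.insert (PySem.List.slice c none (some idx)) (PySem.List.slice c (some (idx + 1)) none)
  else d

def parse_cookie_value_alt (cookies_header : String) (cookie_name : String) : Option String :=
  (((PySem.Chars.splitOn cookies_header.toList [';']).foldl pvB_step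
      PySem.Dict.empty).get? cookie_name.toList).map String.ofList

-- ===== PRECONDITION & SPEC =====
-- Pre_ excludes cookie names containing '=' (not a legal cookie name): there A's
-- prefix match and B's split at the first '=' are both defensible and can disagree.
def Pre_parse_cookie_value (cookies_header : String) (cookie_name : String) : Prop :=
  '=' ∉ cookie_name.toList

instance (cookies_header : String) (cookie_name : String) :
    Decidable (Pre_parse_cookie_value cookies_header cookie_name) := by
  unfold Pre_parse_cookie_value; infer_instance

def pvWitness_parse_cookie_value : String × String := ("session=abc; foo=bar", "foo")

def Spec_parse_cookie_value (cookies_header : String) (cookie_name : String) (out : Option String) : Prop := out = parse_cookie_value_alt cookies_header cookie_name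
instance (cookies_header : String) (cookie_name : String) (out : Option String) : Decidable (Spec_parse_cookie_value cookies_header cookie_name out) := by unfold Spec_parse_cookie_value; infer_instance

-- ===== CLAIM (what is proved, stated in full; the proofs are below) =====
def Claim_equal_parse_cookie_value : Prop := ∀ (cookies_header : String) (cookie_name : String), Dom_parse_cookie_value cookies_header cookie_name → Pre_parse_cookie_value cookies_header cookie_name → Spec_parse_cookie_value cookies_header cookie_name (parse_cookie_value cookies_header cookie_name)

-- ===== LEMMAS AND PROOFS =====

-- unfolding helpers (definitional)
lemma pvA_loop_cons (pref cookie : List Char) (rest : List (List Char)) :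
    pvA_loop pref (cookie :: rest) =
      (if PySem.Chars.startswith (PySem.Chars.strip cookie) pref then
        some (PySem.List.slice (PySem.Chars.strip cookie) (some (pref.length : Int)) none)
      else pvA_loop pref rest) := rfl

lemma pvB_step_eq (d : PySem.Dict (List Char) (List Char)) (piece : List Char) :
    pvB_step d piece =
      (if PySem.Chars.find (PySem.Chars.strip piece) ['='] ≠ -1 ∧
          d.contains (PySem.List.slice (PySem.Chars.strip piece) none
            (some (PySem.Chars.find (PySem.Chars.strip piece) ['=']))) = false then
        d.insert
          (PySem.List.slice (PySem.Chars.strip piece) none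
            (some (PySem.Chars.find (PySem.Chars.strip piece) ['='])))
          (PySem.List.slice (PySem.Chars.strip piece)
            (some (PySem.Chars.find (PySem.Chars.strip piece) ['='] + 1)) none)
      else d) := rfl

-- in the match case the first '=' of the piece sits right after the name
lemma pv_match_idx (c n : List Char) (hn : '=' ∉ n)
    (h : PySem.Chars.startswith c (n ++ ['=']) = true) :
    PySem.Chars.find c ['='] = (n.length : Int) := by
  obtain ⟨t, ht⟩ := (PySem.Chars.startswith_iff c (n ++ ['='])).mp h
  have hinf : ['='] <:+: c := ⟨n, t, by simpa using ht⟩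
  have hf : 0 ≤ PySem.Chars.find c ['='] := (PySem.Chars.find_nonneg_iff c ['=']).mpr hinf
  obtain ⟨hpre, hmin⟩ := PySem.Chars.find_spec hf
  have hc : c = n ++ '=' :: t := by simpa using ht.symm
  obtain ⟨u, hu⟩ := hpre
  set k := (PySem.Chars.find c ['=']).toNat with hk
  have hjn : k = n.length := by
    by_contra hne
    rcases Nat.lt_or_ge k n.length with hlt | hge
    · have hdrop : List.drop k c = List.drop k n ++ '=' :: t := by
        rw [hc, List.drop_append_of_le_length (le_of_lt hlt)]
      have hne' : List.drop k n ≠ [] := by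
        apply List.ne_nil_of_length_pos
        rw [List.length_drop]
        omega
      obtain ⟨x, xs, hx⟩ := List.exists_cons_of_ne_nil hne'
      have heq : ('=' : Char) :: u = x :: (xs ++ '=' :: t) := by
        have := hu.trans hdrop
        rw [hx] at this
        simpa using this
      have hxn : x ∈ n := by
        apply List.mem_of_mem_drop (i := k)
        rw [hx]
        exact List.mem_cons_self
      rw [← (List.cons.injEq _ _ _ _).mp heq |>.1] at hxn
      exact hn hxn
    · have hgt : n.length < k := lt_of_le_of_ne hge (fun h' => hne h'.symm)
      refine hmin n.length hgt ⟨t, ?_⟩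
      rw [hc, List.drop_append_of_le_length (le_refl _)]
      simp
  rw [← Int.toNat_of_nonneg hf, ← hk, hjn]

-- a stripped piece passes A's prefix test iff it has an '=' and the text before
-- its first '=' is exactly the cookie name (needs '=' ∉ name)
lemma pv_match_iff (c n : List Char) (hn : '=' ∉ n) :
    PySem.Chars.startswith c (n ++ ['=']) = true ↔
      (0 ≤ PySem.Chars.find c ['='] ∧
       c.take (PySem.Chars.find c ['=']).toNat = n) := by
  constructor
  · intro h
    have hidx := pv_match_idx c n hn h
    obtain ⟨t, ht⟩ := (PySem.Chars.startswith_iff c (n ++ ['='])).mp h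
    have hc : c = n ++ '=' :: t := by simpa using ht.symm
    refine ⟨by rw [hidx]; exact Int.natCast_nonneg _, ?_⟩
    rw [hidx, Int.toNat_natCast, hc]
    exact List.take_left
  · rintro ⟨h0, htake⟩
    obtain ⟨hpre, -⟩ := PySem.Chars.find_spec h0
    obtain ⟨u, hu⟩ := hpre
    apply (PySem.Chars.startswith_iff c (n ++ ['='])).mpr
    refine ⟨u, ?_⟩
    calc n ++ ['='] ++ u = n ++ ('=' :: u) := by simp
    _ = c.take (PySem.Chars.find c ['=']).toNat ++ c.drop (PySem.Chars.find c ['=']).toNat := by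
        rw [htake, ← hu]; simp
    _ = c := List.take_append_drop _ _

-- once the name is a key of d, later pieces never change its binding
lemma pv_fold_found (n : List Char) :
    ∀ (pieces : List (List Char)) (d : PySem.Dict (List Char) (List Char)),
      d.contains n = true →
      (pieces.foldl pvB_step d).get? n = d.get? n := by
  intro pieces
  induction pieces with
  | nil => intro d _; rfl
  | cons piece rest ih =>
    intro d hd
    show (rest.foldl pvB_step (pvB_step d piece)).get? n = d.get? n
    rw [pvB_step_eq]
    split
    · next hcond =>
      have hne : n ≠ PySem.List.slice (PySem.Chars.strip piece) none
          (some (PySem.Chars.find (PySem.Chars.strip piece) ['='])) := by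
        intro heq; rw [← heq, hd] at hcond; exact Bool.true_eq_false.mp hcond.2
      rw [ih _ (by rw [PySem.Dict.contains_insert]; simp [hd])]
      exact PySem.Dict.get?_insert_of_ne d _ hne
    · exact ih d hd

-- while the name is not yet a key of d, B's fold-then-lookup equals A's loop
lemma pv_fold_agree (n : List Char) (hn : '=' ∉ n) :
    ∀ (pieces : List (List Char)) (d : PySem.Dict (List Char) (List Char)),
      d.contains n = false →
      (pieces.foldl pvB_step d).get? n = pvA_loop (n ++ ['=']) pieces := by
  intro pieces
  induction pieces with
  | nil =>
    intro d hd
    exact (PySem.Dict.get?_eq_none_iff_contains d n).mpr hd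
  | cons piece rest ih =>
    intro d hd
    show (rest.foldl pvB_step (pvB_step d piece)).get? n = _
    rw [pvB_step_eq, pvA_loop_cons]
    by_cases hm : PySem.Chars.startswith (PySem.Chars.strip piece) (n ++ ['=']) = true
    · set c := PySem.Chars.strip piece with hcdef
      have hidx := pv_match_idx c n hn hm
      have htake := ((pv_match_iff c n hn).mp hm).2
      have hkey : PySem.List.slice c none (some (PySem.Chars.find c ['='])) = n := by
        rw [hidx, PySem.List.slice_to_natCast]
        rw [hidx, Int.toNat_natCast] at htake
        exact htake
      have hcond : PySem.Chars.find c ['='] ≠ -1 ∧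
          d.contains (PySem.List.slice c none (some (PySem.Chars.find c ['=']))) = false := by
        refine ⟨by rw [hidx]; omega, by rw [hkey]; exact hd⟩
      rw [if_pos hcond, if_pos hm, hkey]
      rw [pv_fold_found n rest _ (PySem.Dict.contains_insert_self d n _)]
      rw [PySem.Dict.get?_insert_self]
      congr 1
      rw [hidx]
      have h1 : ((n.length : Int) + 1) = ((n.length + 1 : Nat) : Int) := by push_cast; ring
      have h2 : ((n ++ ['=']).length : Int) = ((n.length + 1 : Nat) : Int) := by simp
      rw [h1, h2, PySem.List.slice_from_natCast]
    · rw [if_neg hm]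
      split
      · next hcond =>
        have hne : n ≠ PySem.List.slice (PySem.Chars.strip piece) none
            (some (PySem.Chars.find (PySem.Chars.strip piece) ['='])) := by
          intro heq
          apply hm
          apply (pv_match_iff _ n hn).mpr
          have h0 : 0 ≤ PySem.Chars.find (PySem.Chars.strip piece) ['='] := by
            have := PySem.Chars.neg_one_le_find (PySem.Chars.strip piece) ['=']
            have := hcond.1
            omega
          refine ⟨h0, ?_⟩
          rw [heq, PySem.List.slice_to _ h0]
        refine ih _ ?_
        rw [PySem.Dict.contains_insert]
        simp only [hd, Bool.or_false]
        exact beq_eq_false_iff_ne.mpr hne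
      · exact ih d hd

-- ===== VERDICT (by name: the statement is the Claim_ definition above) =====
theorem parse_cookie_value_spec : Claim_equal_parse_cookie_value := by
  intro h n _ hpre
  unfold Spec_parse_cookie_value parse_cookie_value parse_cookie_value_alt
  by_cases he : h.toList = []
  · rw [if_pos he, he]
    have h1 : PySem.Chars.splitOn ([] : List Char) [';'] = [[]] := by decide
    rw [h1]
    have h2 : pvB_step PySem.Dict.empty [] = PySem.Dict.empty := by decide
    show (none : Option String) = ((pvB_step PySem.Dict.empty []).get? n.toList).map String.ofList
    rw [h2, PySem.Dict.get?_empty]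
    rfl
  · rw [if_neg he, pv_fold_agree n.toList hpre _ _ (PySem.Dict.contains_empty _)]
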